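-- pv_equiv track=rewrite | github.com/micah-boster/daily-summarizer | src/quality.py | _detect_changed_sections
-- ===== SOURCE A (Python) =====
-- def _detect_changed_sections(raw_lines: list[str], current_lines: list[str]) -> list[str]:
--     """Identify which markdown sections were changed between raw and current.
--
--     Looks for ## headers and checks if content under them differs.
--
--     Returns:
--         List of section names that were modified.
--     """
--     raw_sections = _split_into_sections(raw_lines)
--     current_sections = _split_into_sections(current_lines)
--
--     changed: list[str] = []
--
--     # Check sections present in both
--     all_section_names = set(raw_sections.keys()) | set(current_sections.keys())
--     for name in all_section_names:
--         raw_content = raw_sections.get(name, "")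
--         current_content = current_sections.get(name, "")
--         if raw_content != current_content:
--             changed.append(name)
--
--     return sorted(changed)
--
-- def _split_into_sections(lines: list[str]) -> dict[str, str]:
--     """Split markdown lines into sections keyed by ## header names."""
--     sections: dict[str, str] = {}
--     current_section = "_preamble"
--     current_content: list[str] = []
--
--     for line in lines:
--         stripped = line.strip()
--         if stripped.startswith("## "):
--             if current_content:
--                 sections[current_section] = "".join(current_content)
--             current_section = stripped[3:].strip()
--             current_content = []
--         else:
--             current_content.append(line)
--
--     if current_content:
--         sections[current_section] = "".join(current_content)
--
--     return sections
-- ===== SOURCE B (Python) =====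
-- def _detect_changed_sections(raw_lines: list[str], current_lines: list[str]) -> list[str]:
--     """Merge-walk the two sorted section-name lists; a section counts as changed
--     when its content differs from the other side's (absent = empty content)."""
--     raw_sections = _split_into_sections(raw_lines)
--     current_sections = _split_into_sections(current_lines)
--
--     raw_names = sorted(raw_sections)
--     current_names = sorted(current_sections)
--
--     changed: list[str] = []
--     i = j = 0
--     while i < len(raw_names) or j < len(current_names):
--         if j == len(current_names) or (i < len(raw_names) and raw_names[i] < current_names[j]):
--             if raw_sections[raw_names[i]] != "":
--                 changed.append(raw_names[i])
--             i += 1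
--         elif i == len(raw_names) or current_names[j] < raw_names[i]:
--             if current_sections[current_names[j]] != "":
--                 changed.append(current_names[j])
--             j += 1
--         else:
--             if raw_sections[raw_names[i]] != current_sections[current_names[j]]:
--                 changed.append(raw_names[i])
--             i += 1
--             j += 1
--     return changed
--
--
-- def _split_into_sections(lines: list[str]) -> dict[str, str]:
--     """Split markdown lines into sections keyed by ## header names."""
--     sections: dict[str, str] = {}
--     current_section = "_preamble"
--     current_content: list[str] = []
--
--     for line in lines:
--         stripped = line.strip()
--         if stripped.startswith("## "):
--             if current_content:
--                 sections[current_section] = "".join(current_content)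
--             current_section = stripped[3:].strip()
--             current_content = []
--         else:
--             current_content.append(line)
--
--     if current_content:
--         sections[current_section] = "".join(current_content)
--
--     return sections
-- ===== Notes on version B (the rewrite author's own statement) =====
-- stated objective: alternative
-- what changed: B keeps the section split but replaces A's change detection (union of the two key sets, then per-name .get(name,"") comparisons, then a final sort of the changed names) by a sort-then-merge: it sorts both dicts' key lists once and walks them with two pointers, emitting changed names directly in order — no union set, no final sort, and no per-key default-lookup pass.
import Mathlib
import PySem

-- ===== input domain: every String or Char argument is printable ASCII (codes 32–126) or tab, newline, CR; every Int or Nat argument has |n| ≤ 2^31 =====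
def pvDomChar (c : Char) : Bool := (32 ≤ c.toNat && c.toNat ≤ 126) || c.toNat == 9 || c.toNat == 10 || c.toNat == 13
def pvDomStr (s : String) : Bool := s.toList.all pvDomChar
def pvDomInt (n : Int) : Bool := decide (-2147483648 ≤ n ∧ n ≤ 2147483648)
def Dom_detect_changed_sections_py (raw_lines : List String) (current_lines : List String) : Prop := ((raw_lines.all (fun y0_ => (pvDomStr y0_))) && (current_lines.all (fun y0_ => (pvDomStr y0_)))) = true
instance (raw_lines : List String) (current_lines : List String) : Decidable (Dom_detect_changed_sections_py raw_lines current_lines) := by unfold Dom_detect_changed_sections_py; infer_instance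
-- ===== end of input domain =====

-- B keeps the _split_into_sections helper but replaces A's change detection (key-set union,
-- per-name default lookups, final sort of the changed names) by a two-pointer merge of the two
-- sorted key lists; objective: alternative algorithm, return value proved equal on all inputs.

-- ===== PORT A =====
-- _split_into_sections, shared verbatim by A and by B (Source B keeps this helper identical).
-- A's loop body, state = (sections, current_section, current_content)
def splitStep (st : PySem.Dict String String × String × List String) (line : String) :
    PySem.Dict String String × String × List String :=
  let stripped := PySem.Str.strip line
  if PySem.Str.startswith stripped "## " then
    let sections := if st.2.2 ≠ [] then st.1.insert st.2.1 (PySem.Str.join "" st.2.2) else st.1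
    (sections, PySem.Str.strip (PySem.Str.slice stripped (some 3) none), ([] : List String))
  else
    (st.1, st.2.1, st.2.2 ++ [line])

-- the final 'if current_content: sections[current_section] = ...'
def splitFinish (st : PySem.Dict String String × String × List String) : PySem.Dict String String :=
  if st.2.2 ≠ [] then st.1.insert st.2.1 (PySem.Str.join "" st.2.2) else st.1

def splitIntoSections (lines : List String) : PySem.Dict String String :=
  splitFinish (lines.foldl splitStep (PySem.Dict.empty, "_preamble", ([] : List String)))

def detect_changed_sections_py (raw_lines : List String) (current_lines : List String) : List String :=
  let raw_sections := splitIntoSections raw_lines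
  let current_sections := splitIntoSections current_lines
  let all_section_names : PySem.Set String :=
    PySem.Set.union (PySem.Set.ofList raw_sections.keys) (PySem.Set.ofList current_sections.keys)
  let changed := all_section_names.foldl
    (fun changed name =>
      if raw_sections.getD name "" ≠ current_sections.getD name "" then changed ++ [name] else changed)
    []
  PySem.List.sorted changed (fun x => x) false

-- ===== PORT B =====
-- Source B's while loop over indices i/j into the two sorted name lists, as the structural
-- recursion on the two remaining list suffixes (the indices only ever advance past the heads).
-- raw_sections[name] is ported as getD name "": the looked-up key is always present
-- (the names are the dict's own keys), so the default is never taken and the port is exact.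
def mergeChanged (raw_sections current_sections : PySem.Dict String String) :
    List String → List String → List String
  | [], [] => []
  | a :: as, [] =>
      if raw_sections.getD a "" ≠ "" then a :: mergeChanged raw_sections current_sections as []
      else mergeChanged raw_sections current_sections as []
  | [], b :: bs =>
      if current_sections.getD b "" ≠ "" then b :: mergeChanged raw_sections current_sections [] bs
      else mergeChanged raw_sections current_sections [] bs
  | a :: as, b :: bs =>
      if a < b then
        if raw_sections.getD a "" ≠ "" then a :: mergeChanged raw_sections current_sections as (b :: bs)
        else mergeChanged raw_sections current_sections as (b :: bs)
      else if b < a then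
        if current_sections.getD b "" ≠ "" then b :: mergeChanged raw_sections current_sections (a :: as) bs
        else mergeChanged raw_sections current_sections (a :: as) bs
      else
        if raw_sections.getD a "" ≠ current_sections.getD b "" then a :: mergeChanged raw_sections current_sections as bs
        else mergeChanged raw_sections current_sections as bs

def detect_changed_sections_py_alt (raw_lines : List String) (current_lines : List String) : List String :=
  let raw_sections := splitIntoSections raw_lines
  let current_sections := splitIntoSections current_lines
  let raw_names := PySem.List.sorted raw_sections.keys (fun x => x) false
  let current_names := PySem.List.sorted current_sections.keys (fun x => x) false
  mergeChanged raw_sections current_sections raw_names current_names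

-- ===== PRECONDITION & SPEC =====
def Spec_detect_changed_sections_py (raw_lines : List String) (current_lines : List String) (out : List String) : Prop := out = detect_changed_sections_py_alt raw_lines current_lines
instance (raw_lines : List String) (current_lines : List String) (out : List String) : Decidable (Spec_detect_changed_sections_py raw_lines current_lines out) := by unfold Spec_detect_changed_sections_py; infer_instance

-- ===== CLAIM (what is proved, stated in full; the proofs are below) =====
def Claim_equal_detect_changed_sections_py : Prop := ∀ (raw_lines : List String) (current_lines : List String), Dom_detect_changed_sections_py raw_lines current_lines → Spec_detect_changed_sections_py raw_lines current_lines (detect_changed_sections_py raw_lines current_lines)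

-- ===== LEMMAS AND PROOFS =====

-- which names the merge emits, as a condition on the input lists and dicts
def MPhi (ra cu : PySem.Dict String String) (ka kb : List String) (x : String) : Prop :=
  (x ∈ ka ∧ x ∉ kb ∧ ra.getD x "" ≠ "") ∨
  (x ∈ kb ∧ x ∉ ka ∧ cu.getD x "" ≠ "") ∨
  (x ∈ ka ∧ x ∈ kb ∧ ra.getD x "" ≠ cu.getD x "")

theorem mem_mergeChanged (ra cu : PySem.Dict String String) (ka kb : List String)
    (hka : ka.Pairwise (· < ·)) (hkb : kb.Pairwise (· < ·)) (x : String) :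
    x ∈ mergeChanged ra cu ka kb ↔ MPhi ra cu ka kb x := by
  induction ka, kb using mergeChanged.induct ra cu with
  | case1 => simp [mergeChanged, MPhi]
  | case2 a as h ih =>
    obtain ⟨hmem, htl⟩ := List.pairwise_cons.1 hka
    have ha : a ∉ as := fun hm => lt_irrefl a (hmem a hm)
    have ih' := ih htl hkb
    by_cases hx : x = a
    · subst hx; simp [mergeChanged, MPhi, h, ha, ih']
    · simp only [mergeChanged, if_pos h, List.mem_cons, ih', MPhi, List.not_mem_nil] at *
      simp [hx]
  | case3 a as h ih =>
    obtain ⟨hmem, htl⟩ := List.pairwise_cons.1 hka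
    have ha : a ∉ as := fun hm => lt_irrefl a (hmem a hm)
    have ih' := ih htl hkb
    by_cases hx : x = a
    · subst hx; simp [mergeChanged, MPhi, h, ha, ih']
    · simp only [mergeChanged, if_neg h, ih', MPhi, List.not_mem_nil] at *
      simp [hx]
  | case4 b bs h ih =>
    obtain ⟨hmem, htl⟩ := List.pairwise_cons.1 hkb
    have hb : b ∉ bs := fun hm => lt_irrefl b (hmem b hm)
    have ih' := ih hka htl
    by_cases hx : x = b
    · subst hx; simp [mergeChanged, MPhi, h, hb, ih']
    · simp only [mergeChanged, if_pos h, List.mem_cons, ih', MPhi, List.not_mem_nil] at *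
      simp [hx]
  | case5 b bs h ih =>
    obtain ⟨hmem, htl⟩ := List.pairwise_cons.1 hkb
    have hb : b ∉ bs := fun hm => lt_irrefl b (hmem b hm)
    have ih' := ih hka htl
    by_cases hx : x = b
    · subst hx; simp [mergeChanged, MPhi, h, hb, ih']
    · simp only [mergeChanged, if_neg h, ih', MPhi, List.not_mem_nil] at *
      simp [hx]
  | case6 a as b bs hab h ih =>
    obtain ⟨hmem, htl⟩ := List.pairwise_cons.1 hka
    have ha : a ∉ as := fun hm => lt_irrefl a (hmem a hm)
    have hakb : a ∉ b :: bs := by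
      intro hm
      rcases List.mem_cons.1 hm with rfl | hm
      · exact lt_irrefl a hab
      · exact lt_irrefl a (hab.trans ((List.pairwise_cons.1 hkb).1 _ hm))
    have ih' := ih htl hkb
    by_cases hx : x = a
    · subst hx; simp [mergeChanged, hab, MPhi, h, ha, hakb, ih']
    · simp only [mergeChanged, if_pos hab, if_pos h, List.mem_cons, ih', MPhi] at *
      simp [hx]
  | case7 a as b bs hab h ih =>
    obtain ⟨hmem, htl⟩ := List.pairwise_cons.1 hka
    have ha : a ∉ as := fun hm => lt_irrefl a (hmem a hm)
    have hakb : a ∉ b :: bs := by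
      intro hm
      rcases List.mem_cons.1 hm with rfl | hm
      · exact lt_irrefl a hab
      · exact lt_irrefl a (hab.trans ((List.pairwise_cons.1 hkb).1 _ hm))
    have ih' := ih htl hkb
    by_cases hx : x = a
    · subst hx; simp [mergeChanged, hab, MPhi, h, ha, hakb, ih']
    · simp only [mergeChanged, if_pos hab, if_neg h, ih', MPhi] at *
      simp [hx]
  | case8 a as b bs hnab hba h ih =>
    obtain ⟨hmem, htl⟩ := List.pairwise_cons.1 hkb
    have hb : b ∉ bs := fun hm => lt_irrefl b (hmem b hm)
    have hbka : b ∉ a :: as := by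
      intro hm
      rcases List.mem_cons.1 hm with rfl | hm
      · exact lt_irrefl b hba
      · exact lt_irrefl b (hba.trans ((List.pairwise_cons.1 hka).1 _ hm))
    have ih' := ih hka htl
    by_cases hx : x = b
    · subst hx; simp [mergeChanged, hnab, hba, MPhi, h, hb, hbka, ih']
    · simp only [mergeChanged, if_neg hnab, if_pos hba, if_pos h, List.mem_cons, ih', MPhi] at *
      simp [hx]
  | case9 a as b bs hnab hba h ih =>
    obtain ⟨hmem, htl⟩ := List.pairwise_cons.1 hkb
    have hb : b ∉ bs := fun hm => lt_irrefl b (hmem b hm)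
    have hbka : b ∉ a :: as := by
      intro hm
      rcases List.mem_cons.1 hm with rfl | hm
      · exact lt_irrefl b hba
      · exact lt_irrefl b (hba.trans ((List.pairwise_cons.1 hka).1 _ hm))
    have ih' := ih hka htl
    by_cases hx : x = b
    · subst hx; simp [mergeChanged, hnab, hba, MPhi, h, hb, hbka, ih']
    · simp only [mergeChanged, if_neg hnab, if_pos hba, if_neg h, ih', MPhi] at *
      simp [hx]
  | case10 a as b bs hnab hnba h ih =>
    have hab : a = b := le_antisymm (not_lt.1 hnba) (not_lt.1 hnab)
    subst hab
    obtain ⟨hmema, htla⟩ := List.pairwise_cons.1 hka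
    obtain ⟨hmemb, htlb⟩ := List.pairwise_cons.1 hkb
    have ha : a ∉ as := fun hm => lt_irrefl a (hmema a hm)
    have hb : a ∉ bs := fun hm => lt_irrefl a (hmemb a hm)
    have ih' := ih htla htlb
    by_cases hx : x = a
    · subst hx; simp [mergeChanged, MPhi, h, ha, hb, ih']
    · simp only [mergeChanged, if_neg hnab, if_pos h, List.mem_cons, ih', MPhi] at *
      simp [hx]
  | case11 a as b bs hnab hnba h ih =>
    have hab : a = b := le_antisymm (not_lt.1 hnba) (not_lt.1 hnab)
    subst hab
    obtain ⟨hmema, htla⟩ := List.pairwise_cons.1 hka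
    obtain ⟨hmemb, htlb⟩ := List.pairwise_cons.1 hkb
    have ha : a ∉ as := fun hm => lt_irrefl a (hmema a hm)
    have hb : a ∉ bs := fun hm => lt_irrefl a (hmemb a hm)
    have hval : ra.getD a "" = cu.getD a "" := not_not.1 h
    have ih' := ih htla htlb
    by_cases hx : x = a
    · subst hx; simp [mergeChanged, MPhi, ha, hb, ih', hval]
    · simp only [mergeChanged, if_neg hnab, if_neg h, ih', MPhi] at *
      simp [hx]

theorem mem_mergeChanged_names (ra cu : PySem.Dict String String) (ka kb : List String)
    (hka : ka.Pairwise (· < ·)) (hkb : kb.Pairwise (· < ·)) (x : String)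
    (hx : x ∈ mergeChanged ra cu ka kb) : x ∈ ka ∨ x ∈ kb := by
  rcases (mem_mergeChanged ra cu ka kb hka hkb x).1 hx with ⟨h, -⟩ | ⟨h, -⟩ | ⟨h, -⟩
  · exact Or.inl h
  · exact Or.inr h
  · exact Or.inl h

theorem pairwise_mergeChanged (ra cu : PySem.Dict String String) (ka kb : List String)
    (hka : ka.Pairwise (· < ·)) (hkb : kb.Pairwise (· < ·)) :
    (mergeChanged ra cu ka kb).Pairwise (· < ·) := by
  induction ka, kb using mergeChanged.induct ra cu with
  | case1 => simp [mergeChanged]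
  | case2 a as h ih =>
    obtain ⟨hmem, htl⟩ := List.pairwise_cons.1 hka
    simp only [mergeChanged, if_pos h]
    refine List.pairwise_cons.2 ⟨fun y hy => ?_, ih htl hkb⟩
    rcases mem_mergeChanged_names ra cu as [] htl hkb y hy with hm | hm
    · exact hmem y hm
    · simp at hm
  | case3 a as h ih =>
    have e : mergeChanged ra cu (a :: as) [] = mergeChanged ra cu as [] := by
      simp only [mergeChanged]; rw [if_neg h]
    rw [e]; exact ih (List.pairwise_cons.1 hka).2 hkb
  | case4 b bs h ih =>
    obtain ⟨hmem, htl⟩ := List.pairwise_cons.1 hkb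
    simp only [mergeChanged, if_pos h]
    refine List.pairwise_cons.2 ⟨fun y hy => ?_, ih hka htl⟩
    rcases mem_mergeChanged_names ra cu [] bs hka htl y hy with hm | hm
    · simp at hm
    · exact hmem y hm
  | case5 b bs h ih =>
    have e : mergeChanged ra cu [] (b :: bs) = mergeChanged ra cu [] bs := by
      simp only [mergeChanged]; rw [if_neg h]
    rw [e]; exact ih hka (List.pairwise_cons.1 hkb).2
  | case6 a as b bs hab h ih =>
    obtain ⟨hmem, htl⟩ := List.pairwise_cons.1 hka
    simp only [mergeChanged, if_pos hab, if_pos h]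
    refine List.pairwise_cons.2 ⟨fun y hy => ?_, ih htl hkb⟩
    rcases mem_mergeChanged_names ra cu as (b :: bs) htl hkb y hy with hm | hm
    · exact hmem y hm
    · rcases List.mem_cons.1 hm with rfl | hm
      · exact hab
      · exact hab.trans ((List.pairwise_cons.1 hkb).1 _ hm)
  | case7 a as b bs hab h ih =>
    have e : mergeChanged ra cu (a :: as) (b :: bs) = mergeChanged ra cu as (b :: bs) := by
      simp only [mergeChanged]; rw [if_pos hab, if_neg h]
    rw [e]; exact ih (List.pairwise_cons.1 hka).2 hkb
  | case8 a as b bs hnab hba h ih =>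
    obtain ⟨hmem, htl⟩ := List.pairwise_cons.1 hkb
    simp only [mergeChanged, if_neg hnab, if_pos hba, if_pos h]
    refine List.pairwise_cons.2 ⟨fun y hy => ?_, ih hka htl⟩
    rcases mem_mergeChanged_names ra cu (a :: as) bs hka htl y hy with hm | hm
    · rcases List.mem_cons.1 hm with rfl | hm
      · exact hba
      · exact hba.trans ((List.pairwise_cons.1 hka).1 _ hm)
    · exact hmem y hm
  | case9 a as b bs hnab hba h ih =>
    have e : mergeChanged ra cu (a :: as) (b :: bs) = mergeChanged ra cu (a :: as) bs := by
      simp only [mergeChanged]; rw [if_neg hnab, if_pos hba, if_neg h]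
    rw [e]; exact ih hka (List.pairwise_cons.1 hkb).2
  | case10 a as b bs hnab hnba h ih =>
    have hab : a = b := le_antisymm (not_lt.1 hnba) (not_lt.1 hnab)
    subst hab
    obtain ⟨hmema, htla⟩ := List.pairwise_cons.1 hka
    obtain ⟨hmemb, htlb⟩ := List.pairwise_cons.1 hkb
    simp only [mergeChanged, if_neg hnab, if_pos h]
    refine List.pairwise_cons.2 ⟨fun y hy => ?_, ih htla htlb⟩
    rcases mem_mergeChanged_names ra cu as bs htla htlb y hy with hm | hm
    · exact hmema y hm
    · exact hmemb y hm
  | case11 a as b bs hnab hnba h ih =>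
    have e : mergeChanged ra cu (a :: as) (b :: bs) = mergeChanged ra cu as bs := by
      simp only [mergeChanged]; rw [if_neg hnab, if_neg hnba, if_neg h]
    rw [e]; exact ih (List.pairwise_cons.1 hka).2 (List.pairwise_cons.1 hkb).2

-- keys of the section dict stay duplicate-free through the split loop
theorem nodup_keys_splitStep (st : PySem.Dict String String × String × List String)
    (line : String) (h : st.1.keys.Nodup) : (splitStep st line).1.keys.Nodup := by
  by_cases hc : PySem.Chars.startswith (PySem.Chars.strip line.toList) ['#', '#', ' '] = true
  · by_cases hcc : st.2.2 = []
    · have e : (splitStep st line).1 = st.1 := by simp [splitStep, hc, hcc]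
      rw [e]; exact h
    · have e : (splitStep st line).1 = st.1.insert st.2.1 (PySem.Str.join "" st.2.2) := by
        simp [splitStep, hc, hcc]
      rw [e]; exact PySem.Dict.nodup_keys_insert _ _ _ h
  · have e : (splitStep st line).1 = st.1 := by simp [splitStep, hc]
    rw [e]; exact h

theorem nodup_keys_splitFold (lines : List String)
    (st : PySem.Dict String String × String × List String) (h : st.1.keys.Nodup) :
    (lines.foldl splitStep st).1.keys.Nodup := by
  induction lines generalizing st with
  | nil => exact h
  | cons l ls ih => exact ih _ (nodup_keys_splitStep st l h)

theorem nodup_keys_splitFinish (st : PySem.Dict String String × String × List String)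
    (h : st.1.keys.Nodup) : (splitFinish st).keys.Nodup := by
  unfold splitFinish
  split
  · exact PySem.Dict.nodup_keys_insert _ _ _ h
  · exact h

theorem nodup_keys_splitIntoSections (lines : List String) :
    (splitIntoSections lines).keys.Nodup :=
  nodup_keys_splitFinish _ (nodup_keys_splitFold lines _ (by simp [PySem.Dict.keys_empty]))

theorem pairwise_lt_sorted_keys (d : PySem.Dict String String) (h : d.keys.Nodup) :
    (PySem.List.sorted d.keys (fun x => x) false).Pairwise (· < ·) := by
  have hle := PySem.List.sorted_pairwise d.keys (fun x => x)
  have hnd : (PySem.List.sorted d.keys (fun x => x) false).Nodup :=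
    ((PySem.List.sorted_perm d.keys (fun x => x) false).nodup_iff).2 h
  exact (hle.and hnd).imp (fun hp => lt_of_le_of_ne hp.1 hp.2)

theorem getD_of_not_mem_keys (d : PySem.Dict String String) (x : String)
    (hx : x ∉ d.keys) : d.getD x "" = "" := by
  have hc : d.contains x = false := by
    cases hcc : d.contains x
    · rfl
    · exact absurd ((PySem.Dict.contains_iff_mem_keys d x).1 hcc) hx
  exact PySem.Dict.getD_of_not_contains _ _ hc

-- the comparison stage: A's union-set filter, sorted, equals B's merge of the sorted key lists
theorem sorted_filter_eq_mergeChanged (ra cu : PySem.Dict String String)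
    (hra : ra.keys.Nodup) (hcu : cu.keys.Nodup) :
    PySem.List.sorted
      ((PySem.Set.union (PySem.Set.ofList ra.keys) (PySem.Set.ofList cu.keys)).filter
        (fun name => ra.getD name "" ≠ cu.getD name ""))
      (fun x => x) false =
    mergeChanged ra cu (PySem.List.sorted ra.keys (fun x => x) false)
      (PySem.List.sorted cu.keys (fun x => x) false) := by
  have hka := pairwise_lt_sorted_keys ra hra
  have hkb := pairwise_lt_sorted_keys cu hcu
  have hpm := pairwise_mergeChanged ra cu _ _ hka hkb
  apply PySem.List.sorted_eq_of_perm_of_pairwise_lt _ _ _ _ hpm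
  · -- merge.Perm (filter …)
    have hnf : ((PySem.Set.union (PySem.Set.ofList ra.keys) (PySem.Set.ofList cu.keys)).filter
        (fun name => ra.getD name "" ≠ cu.getD name "")).Nodup :=
      (PySem.Set.nodup_union _ _ (PySem.Set.nodup_ofList ra.keys)).filter _
    have hnm : (mergeChanged ra cu (PySem.List.sorted ra.keys (fun x => x) false)
        (PySem.List.sorted cu.keys (fun x => x) false)).Nodup :=
      hpm.imp (fun hp => ne_of_lt hp)
    refine (List.perm_ext_iff_of_nodup hnm hnf).2 fun x => ?_
    rw [mem_mergeChanged ra cu _ _ hka hkb, List.mem_filter]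
    simp only [PySem.Set.mem_union, PySem.Set.mem_ofList, PySem.List.mem_sorted,
      decide_eq_true_eq, MPhi]
    by_cases hx1 : x ∈ ra.keys <;> by_cases hx2 : x ∈ cu.keys
    · simp [hx1, hx2]
    · simp [hx1, hx2, getD_of_not_mem_keys cu x hx2]
    · simp [hx1, hx2, getD_of_not_mem_keys ra x hx1]
    · simp [hx1, hx2]

theorem detect_changed_sections_py_spec : Claim_equal_detect_changed_sections_py := by
  intro raw_lines current_lines _
  show detect_changed_sections_py raw_lines current_lines =
    detect_changed_sections_py_alt raw_lines current_lines
  unfold detect_changed_sections_py detect_changed_sections_py_alt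
  simp only [PySem.List.foldl_append_ite_eq_filter, List.nil_append]
  exact sorted_filter_eq_mergeChanged _ _
    (nodup_keys_splitIntoSections raw_lines) (nodup_keys_splitIntoSections current_lines)
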